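-- pv_equiv track=rewrite | github.com/Kim-Jeong-Ju/Algorithm_Python | 095_assessment_of_performance.py | solution
-- ===== SOURCE A (Python) =====
-- def solution(scores):
--
--
--     ## 시간 초과 O 풀이
--     # answer = 0
--     #
--     # temp1 = [[idx, score1, score2] for idx, (score1, score2) in enumerate(scores)]
--     # for A_info, B_info in combinations(temp1, 2):
--     #     if A_info in temp1 and B_info in temp1:
--     #         if A_info[1] < B_info[1] and A_info[2] < B_info[2]:
--     #             if A_info[0] == 0: return -1
--     #             else: del temp1[temp1.index(A_info)]
--     #         elif A_info[1] > B_info[1] and A_info[2] > B_info[2]: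
--     #             if B_info[0] == 0: return -1
--     #             else: del temp1[temp1.index(B_info)]
--     #
--     # temp2 = sorted(temp1, reverse=True, key=lambda x: sum(x)-x[0])
--     # addition = 0
--     # for seq, (idx, score1, score2) in enumerate(temp2):
--     #     if seq == 0:
--     #         addition = score1 + score2
--     #         answer += 1
--     #     else:
--     #         if addition == score1 + score2: pass
--     #         else:
--     #             addition = score1 + score2
--     #             answer = seq + 1
--     #
--     #     if idx == 0: return answer
--
--
--     ## 시간 초과 X 풀이
--     ## 정답 풀이 -- 이해 필요
--     answer = 1
--     wanho, wanho_sum = scores[0], sum(scores[0])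
--     scores = sorted(scores, key=lambda x: (-x[0], x[1]))
--
--     thres = 0
--     for score in scores:
--         if wanho[0] < score[0] and wanho[1] < score[1]: return -1
--         if thres <= score[1]:
--             if wanho_sum < sum(score): answer += 1
--             thres = score[1]
--
--     return answer
-- ===== SOURCE B (Python) =====
-- def solution(scores):
--     wanho = scores[0]
--     ws = sum(wanho)
--
--     def dominated(s):
--         return any(t[0] > s[0] and t[1] > s[1] for t in scores)
--
--     if dominated(wanho):
--         return -1
--     return 1 + sum(1 for s in scores if sum(s) > ws and not dominated(s))
-- ===== Notes on version B (the rewrite author's own statement) =====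
-- stated objective: alternative
-- what changed: B drops A's sort-and-running-threshold scan and instead tests each student directly for domination with an explicit inner scan, counting non-dominated students whose total exceeds Wanho's.
-- intended difference: On inputs where nobody dominates Wanho but some student with a negative second score is dominated by nobody and has a total above Wanho's, A omits that student from the rank count because its running threshold starts at 0, while B counts every non-dominated student with a higher total, which is the intended rank (e.g. [[0,0],[3,-1]]: A returns 1, B returns 2). — e.g. on solution([[0, 0], [3, -1]]): A returns 1, B returns 2
import Mathlib
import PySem

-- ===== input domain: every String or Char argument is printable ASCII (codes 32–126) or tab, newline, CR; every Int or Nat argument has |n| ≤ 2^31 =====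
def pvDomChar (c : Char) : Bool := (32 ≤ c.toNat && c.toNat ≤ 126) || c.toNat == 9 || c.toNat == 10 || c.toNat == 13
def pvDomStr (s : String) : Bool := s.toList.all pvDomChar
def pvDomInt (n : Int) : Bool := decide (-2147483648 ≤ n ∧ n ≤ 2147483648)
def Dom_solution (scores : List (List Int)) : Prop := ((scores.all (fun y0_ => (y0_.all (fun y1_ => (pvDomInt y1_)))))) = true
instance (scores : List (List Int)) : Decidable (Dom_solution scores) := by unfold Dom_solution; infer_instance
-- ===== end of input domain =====

-- B replaces A's sort-plus-running-threshold scan by a direct per-student domination test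
-- (alternative algorithm, similar cost); A's threshold starts at 0, so A miscounts
-- non-dominated students with a negative second score — stated as D_solution below.


-- ===== PORT A =====
-- s[0], s[1] (in range on every input Pre_ admits; the default is never consulted there)
def item0 (s : List Int) : Int := PySem.List.pyGetD s 0 0
def item1 (s : List Int) : Int := PySem.List.pyGetD s 1 0

-- key=lambda x: (-x[0], x[1]) — Python's lexicographic tuple order is Prod.Lex on Int × Int
def aKey (x : List Int) : Lex (Int × Int) := toLex (-(item0 x), item1 x)

-- the 'for score in scores:' loop with its early 'return -1' and (answer, thres) state
def aLoop (w : List Int) (wsum : Int) : List (List Int) → Int → Int → Int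
  | [], answer, _ => answer
  | s :: rest, answer, thres =>
    if item0 w < item0 s ∧ item1 w < item1 s then -1
    else if thres ≤ item1 s then
      aLoop w wsum rest (if wsum < s.sum then answer + 1 else answer) (item1 s)
    else aLoop w wsum rest answer thres

def solution (scores : List (List Int)) : Int :=
  let wanho := PySem.List.pyGetD scores 0 []
  let wanhoSum := wanho.sum
  let sortedScores := PySem.List.sorted scores aKey
  aLoop wanho wanhoSum sortedScores 1 0

-- ===== PORT B =====
-- any(t[0] > s[0] and t[1] > s[1] for t in scores)
def bDominated (scores : List (List Int)) (s : List Int) : Bool :=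
  scores.any (fun t => decide (item0 s < item0 t) && decide (item1 s < item1 t))

def solution_alt (scores : List (List Int)) : Int :=
  let wanho := PySem.List.pyGetD scores 0 []
  let ws := wanho.sum
  if bDominated scores wanho then -1
  else 1 + (scores.countP (fun s => decide (ws < s.sum) && !bDominated scores s) : Int)

-- ===== PRECONDITION & SPEC =====
-- Pre_ excludes exactly the inputs where Python A raises IndexError: an empty scores list
-- (scores[0]) or an inner list with fewer than two entries (x[0]/x[1] in the sort key).
def Pre_solution (scores : List (List Int)) : Prop :=
  scores ≠ [] ∧ ∀ s ∈ scores, 2 ≤ s.length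
instance (scores : List (List Int)) : Decidable (Pre_solution scores) := by
  unfold Pre_solution; infer_instance
def pvWitness_solution : List (List Int) := [[1, 2], [3, 4]]

-- On inputs where nobody dominates Wanho but some student with a negative second score is
-- dominated by nobody and has a total above Wanho's, A omits that student from the count
-- (its running threshold starts at 0) and returns a smaller rank; B counts every
-- non-dominated student with a higher total, which is the intended rank.
-- s is dominated by nobody in F (both coordinates strictly greater never happens)
def nd (F : List (List Int)) (s : List Int) : Prop :=
  ∀ t ∈ F, item0 t ≤ item0 s ∨ item1 t ≤ item1 s
def D_solution (scores : List (List Int)) : Prop :=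
  nd scores scores.head! ∧
  ∃ s ∈ scores, item1 s < 0 ∧ scores.head!.sum < s.sum ∧ nd scores s
instance (scores : List (List Int)) : Decidable (D_solution scores) := by
  unfold D_solution nd; infer_instance

def Spec_solution (scores : List (List Int)) (out : Int) : Prop :=
  ¬ D_solution scores → out = solution_alt scores
instance (scores : List (List Int)) (out : Int) : Decidable (Spec_solution scores out) := by
  unfold Spec_solution; infer_instance

def pvDiffWitness_solution : List (List Int) := [[0, 0], [3, -1]]
def pvDiffWitnessOut_solution : Int × Int := (1, 2)

-- ===== CLAIM (what is proved, stated in full; the proofs are below) =====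
def Claim_unchanged_solution : Prop := ∀ (scores : List (List Int)), Dom_solution scores → Pre_solution scores → Spec_solution scores (solution scores)
def Claim_changed_solution : Prop := Dom_solution (pvDiffWitness_solution) ∧ Pre_solution (pvDiffWitness_solution) ∧ D_solution (pvDiffWitness_solution) ∧ solution (pvDiffWitness_solution) = pvDiffWitnessOut_solution.1 ∧ solution_alt (pvDiffWitness_solution) = pvDiffWitnessOut_solution.2 ∧ pvDiffWitnessOut_solution.1 ≠ pvDiffWitnessOut_solution.2
def Claim_exact_solution : Prop := ∀ (scores : List (List Int)), Dom_solution scores → Pre_solution scores → D_solution scores → solution scores ≠ solution_alt scores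

-- ===== LEMMAS AND PROOFS =====

-- running maximum of the second scores over the already-processed prefix, seeded with A's 0
def maxB (P : List (List Int)) : Int := P.foldl (fun acc s => max acc (item1 s)) 0

theorem foldl_max_le_iff (P : List (List Int)) (a v : Int) :
    P.foldl (fun acc s => max acc (item1 s)) a ≤ v ↔ a ≤ v ∧ ∀ t ∈ P, item1 t ≤ v := by
  induction P generalizing a with
  | nil => simp
  | cons h t ih =>
    simp only [List.foldl_cons, ih, max_le_iff, List.mem_cons]
    constructor
    · rintro ⟨⟨h1, h2⟩, h3⟩
      exact ⟨h1, fun x hx => hx.elim (fun e => e ▸ h2) (h3 x)⟩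
    · rintro ⟨h1, h2⟩
      exact ⟨⟨h1, h2 h (Or.inl rfl)⟩, fun x hx => h2 x (Or.inr hx)⟩

theorem maxB_le_iff (P : List (List Int)) (v : Int) :
    maxB P ≤ v ↔ 0 ≤ v ∧ ∀ t ∈ P, item1 t ≤ v := foldl_max_le_iff P 0 v

theorem maxB_append_singleton (P : List (List Int)) (s : List Int) :
    maxB (P ++ [s]) = max (maxB P) (item1 s) := by
  simp [maxB, List.foldl_append]

theorem aKey_le_elim {t s : List Int} (h : aKey t ≤ aKey s) :
    item0 s < item0 t ∨ (item0 t = item0 s ∧ item1 t ≤ item1 s) := by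
  have h' := Prod.Lex.le_iff.mp h
  simp only [aKey, ofLex_toLex] at h'
  rcases h' with h1 | ⟨h1, h2⟩
  · left; omega
  · right; omega

theorem bDominated_eq_false_iff (F : List (List Int)) (s : List Int) :
    bDominated F s = false ↔ ∀ t ∈ F, ¬(item0 s < item0 t ∧ item1 s < item1 t) := by
  simp [bDominated, List.any_eq_false]

-- A's counting predicate, phrased against the full list F
def condA (F : List (List Int)) (ws : Int) (s : List Int) : Bool :=
  decide (0 ≤ item1 s) && decide (ws < s.sum) && !bDominated F s

-- the loop characterisation: with thres = running max of the prefix P, on a key-sorted P ++ L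
theorem aLoop_char (w : List Int) (ws : Int) :
    ∀ (L P : List (List Int)) (answer : Int),
      (P ++ L).Pairwise (fun a b => aKey a ≤ aKey b) →
      aLoop w ws L answer (maxB P) =
        if L.any (fun s => decide (item0 w < item0 s) && decide (item1 w < item1 s)) then -1
        else answer + (L.countP (condA (P ++ L) ws) : Int) := by
  intro L
  induction L with
  | nil => intro P answer _; simp [aLoop]
  | cons s r ih =>
    intro P answer hsorted
    obtain ⟨hP, hSR, hcross⟩ := List.pairwise_append.mp hsorted
    obtain ⟨hs_r, hr⟩ := List.pairwise_cons.mp hSR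
    by_cases hdomW : item0 w < item0 s ∧ item1 w < item1 s
    · simp [aLoop, hdomW]
    · have hiff : maxB P ≤ item1 s ↔
          (0 ≤ item1 s ∧ bDominated (P ++ s :: r) s = false) := by
        rw [maxB_le_iff, bDominated_eq_false_iff]
        constructor
        · rintro ⟨h0, hall⟩
          refine ⟨h0, fun t ht => ?_⟩
          rcases List.mem_append.mp ht with htP | htSR
          · have := hall t htP; omega
          · rcases List.mem_cons.mp htSR with rfl | htr
            · omega
            · have := aKey_le_elim (hs_r t htr); omega
        · rintro ⟨h0, hnd⟩
          refine ⟨h0, fun t ht => ?_⟩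
          rcases aKey_le_elim (hcross t ht s List.mem_cons_self) with h1 | ⟨h1, h2⟩
          · have := hnd t (List.mem_append.mpr (Or.inl ht)); omega
          · omega
      have hassoc : (P ++ [s]) ++ r = P ++ s :: r := by simp
      have hsorted' : ((P ++ [s]) ++ r).Pairwise (fun a b => aKey a ≤ aKey b) := by
        rw [hassoc]; exact hsorted
      by_cases hthres : maxB P ≤ item1 s
      · obtain ⟨h0, hnd⟩ := hiff.mp hthres
        have hcond : condA (P ++ s :: r) ws s = decide (ws < s.sum) := by
          simp [condA, h0, hnd]
        have hmax : item1 s = maxB (P ++ [s]) := by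
          rw [maxB_append_singleton, max_eq_right hthres]
        rw [show aLoop w ws (s :: r) answer (maxB P) =
              aLoop w ws r (if ws < s.sum then answer + 1 else answer) (item1 s) by
              simp [aLoop, hdomW, hthres]]
        rw [hmax, ih (P ++ [s]) _ hsorted', hassoc]
        have hanys : ((s :: r).any (fun s => decide (item0 w < item0 s) && decide (item1 w < item1 s)))
            = r.any (fun s => decide (item0 w < item0 s) && decide (item1 w < item1 s)) := by
          simp [List.any_cons]; tauto
        rw [hanys]
        split_ifs with hany hws
        · rfl
        · rw [List.countP_cons, hcond]
          simp [hws]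
          ring
        · rw [List.countP_cons, hcond]
          simp [hws]
      · have hcond : condA (P ++ s :: r) ws s = false := by
          rcases not_and_or.mp (fun hh => hthres (hiff.mpr hh)) with h0 | hd
          · simp [condA, h0]
          · have : bDominated (P ++ s :: r) s = true := by
              cases hb : bDominated (P ++ s :: r) s
              · exact absurd hb hd
              · rfl
            simp [condA, this]
        have hmax : maxB P = maxB (P ++ [s]) := by
          rw [maxB_append_singleton, max_eq_left (by omega)]
        rw [show aLoop w ws (s :: r) answer (maxB P) =
              aLoop w ws r answer (maxB P) by simp [aLoop, hdomW, hthres]]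
        rw [hmax, ih (P ++ [s]) _ hsorted', hassoc]
        have hanys : ((s :: r).any (fun s => decide (item0 w < item0 s) && decide (item1 w < item1 s)))
            = r.any (fun s => decide (item0 w < item0 s) && decide (item1 w < item1 s)) := by
          simp [List.any_cons]; tauto
        rw [hanys]
        split_ifs with hany
        · rfl
        · rw [List.countP_cons, hcond]; simp

theorem countP_lt_countP {α : Type} (l : List α) (p q : α → Bool)
    (hpq : ∀ x ∈ l, p x = true → q x = true)
    (x : α) (hx : x ∈ l) (hq : q x = true) (hp : p x = false) :
    l.countP p < l.countP q := by
  induction l with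
  | nil => simp at hx
  | cons a t ih =>
    rcases List.mem_cons.mp hx with h | hx
    · subst h
      have h1 : t.countP p ≤ t.countP q :=
        List.countP_mono_left (fun y hy hpy => hpq y (List.mem_cons_of_mem _ hy) hpy)
      simp [hp, hq]; omega
    · have hlt := ih (fun y hy h => hpq y (List.mem_cons_of_mem _ hy) h) hx
      by_cases hpa : p a = true
      · have hqa := hpq a List.mem_cons_self hpa
        simp [hpa, hqa]; omega
      · simp only [List.countP_cons]
        split_ifs <;> omega

-- solution scores = if anyone dominates Wanho then -1 else 1 + A's count over scores
theorem solution_eq (scores : List (List Int)) :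
    solution scores =
      if bDominated scores (PySem.List.pyGetD scores 0 []) then -1
      else 1 + (scores.countP (condA scores (PySem.List.pyGetD scores 0 []).sum) : Int) := by
  have hperm : (PySem.List.sorted scores aKey).Perm scores :=
    PySem.List.sorted_perm scores aKey false
  have hpair := PySem.List.sorted_pairwise scores aKey
  have h := aLoop_char (PySem.List.pyGetD scores 0 []) (PySem.List.pyGetD scores 0 []).sum
    (PySem.List.sorted scores aKey) [] 1 (by simpa using hpair)
  rw [show maxB [] = (0 : Int) from rfl] at h
  simp only [List.nil_append] at h
  show aLoop _ _ _ 1 0 = _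
  rw [h]
  have hany : (PySem.List.sorted scores aKey).any
      (fun s => decide (item0 (PySem.List.pyGetD scores 0 []) < item0 s) &&
                decide (item1 (PySem.List.pyGetD scores 0 []) < item1 s))
      = bDominated scores (PySem.List.pyGetD scores 0 []) := hperm.any_eq
  have hcount : ∀ ws : Int, (PySem.List.sorted scores aKey).countP
      (condA (PySem.List.sorted scores aKey) ws)
      = scores.countP (condA scores ws) := by
    intro ws
    have h1 : (PySem.List.sorted scores aKey).countP
        (condA (PySem.List.sorted scores aKey) ws)
        = (PySem.List.sorted scores aKey).countP (condA scores ws) := by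
      apply List.countP_congr
      intro x _
      have hbx : bDominated (PySem.List.sorted scores aKey) x = bDominated scores x :=
        List.Perm.any_eq hperm
      unfold condA
      rw [hbx]
    rw [h1, hperm.countP_eq]
  rw [hany, hcount]

theorem head_bang_eq (scores : List (List Int)) (h : scores ≠ []) :
    scores.head! = PySem.List.pyGetD scores 0 [] := by
  cases scores with
  | nil => exact absurd rfl h
  | cons a l => simp [PySem.List.pyGetD]

theorem nd_iff (F : List (List Int)) (s : List Int) :
    nd F s ↔ bDominated F s = false := by
  rw [bDominated_eq_false_iff]; unfold nd
  constructor <;> (intro h t ht; have := h t ht; omega)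

-- ===== VERDICT (by name: the statement is the Claim_ definition above) =====
theorem solution_spec : Claim_unchanged_solution := by
  intro scores _ hpre
  unfold Spec_solution
  intro hnD
  rw [solution_eq]
  show _ = solution_alt scores
  unfold solution_alt
  cases hb : bDominated scores (PySem.List.pyGetD scores 0 []) with
  | true => simp [hb]
  | false =>
    simp only [hb, Bool.false_eq_true, if_false]
    congr 2
    apply List.countP_congr
    intro s hs
    have hnw : nd scores scores.head! := by
      rw [head_bang_eq scores hpre.1, nd_iff]; exact hb
    have hnbad : ¬ ∃ s ∈ scores, item1 s < 0 ∧ scores.head!.sum < s.sum ∧ nd scores s := by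
      intro hbad
      exact hnD ⟨hnw, hbad⟩
    by_cases h0 : 0 ≤ item1 s
    · simp [condA, h0]
    · have : ¬(decide ((PySem.List.pyGetD scores 0 []).sum < s.sum) && !bDominated scores s) = true := by
        intro hc
        simp only [Bool.and_eq_true, Bool.not_eq_true', decide_eq_true_eq] at hc
        refine hnbad ⟨s, hs, by omega, ?_, (nd_iff _ _).mpr hc.2⟩
        rw [head_bang_eq scores hpre.1]; exact hc.1
      simp only [condA, Bool.eq_false_iff.mpr this]
      simp [h0]

theorem solution_changed : Claim_changed_solution := by
  unfold Claim_changed_solution; decide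

theorem solution_tight : Claim_exact_solution := by
  intro scores _ hpre hD
  obtain ⟨hnw, s0, hs0, hneg, hsum, hnds0⟩ := hD
  rw [head_bang_eq scores hpre.1] at hnw hsum
  have hb : bDominated scores (PySem.List.pyGetD scores 0 []) = false :=
    (nd_iff _ _).mp hnw
  rw [solution_eq]
  show _ ≠ solution_alt scores
  unfold solution_alt
  simp only [hb, Bool.false_eq_true, if_false]
  have hlt : scores.countP (condA scores (PySem.List.pyGetD scores 0 []).sum) <
      scores.countP (fun s => decide ((PySem.List.pyGetD scores 0 []).sum < s.sum) && !bDominated scores s) := by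
    refine countP_lt_countP scores _ _ ?_ s0 hs0 ?_ ?_
    · intro x _ hx
      simp only [condA, Bool.and_eq_true] at hx
      rcases hx with ⟨⟨_, h2⟩, h3⟩
      simp [h2, h3]
    · simp only [Bool.and_eq_true, Bool.not_eq_true', decide_eq_true_eq]
      exact ⟨hsum, (nd_iff _ _).mp hnds0⟩
    · simp only [condA]
      rw [decide_eq_false (by omega : ¬(0 ≤ item1 s0))]
      simp
  omega
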